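-- pv_equiv track=rewrite | github.com/su3inni/algorithm | steps/basic/5397키로거.py | check
-- ===== SOURCE A (Python) =====
-- def check(pwd):
--     left=[]
--     right=[]
--     for p in pwd:
--         if p=='-':
--             if left:
--                 left.pop()
--         elif p=='<' :
--             if left:
--                 move = left.pop()
--                 right.append(move)
--         elif p=='>' :
--             if right:
--                 move = right.pop()
--                 left.append(move)
--         else:
--             left.append(p)
--     # left.extend(reversed(right))
--     left += reversed(right)
--     real = ''
--     for r in left:
--         real+=r
--
--     return real
-- ===== SOURCE B (Python) =====
-- def check(pwd):
--     buf = []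
--     cur = 0
--     for p in pwd:
--         if p == '<':
--             if cur > 0:
--                 cur -= 1
--         elif p == '>':
--             if cur < len(buf):
--                 cur += 1
--         elif p == '-':
--             if cur > 0:
--                 del buf[cur - 1]
--                 cur -= 1
--         else:
--             buf.insert(cur, p)
--             cur += 1
--     return ''.join(buf)
-- ===== Notes on version B (the rewrite author's own statement) =====
-- stated objective: alternative
-- what changed: Replaces the two-stack editor (chars shuttled between a left and a right stack) by a single buffer with an integer cursor, using positional insert/delete instead of push/pop transfers.
import Mathlib
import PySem

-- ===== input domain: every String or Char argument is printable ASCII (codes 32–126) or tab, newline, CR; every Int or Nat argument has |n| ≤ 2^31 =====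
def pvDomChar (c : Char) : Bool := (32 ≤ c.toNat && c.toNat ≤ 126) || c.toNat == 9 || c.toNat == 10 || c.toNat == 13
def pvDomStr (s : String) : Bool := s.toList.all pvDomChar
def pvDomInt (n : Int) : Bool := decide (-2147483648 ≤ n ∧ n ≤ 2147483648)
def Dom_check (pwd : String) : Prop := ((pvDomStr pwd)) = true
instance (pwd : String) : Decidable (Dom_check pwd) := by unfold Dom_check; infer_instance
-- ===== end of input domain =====

-- B replaces A's two-stack editor by a single buffer with an integer cursor (alternative decomposition, same cost class).

-- ===== PORT A =====
-- two stacks: left (top = last element) and right (top = last element)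
def checkStep (s : List Char × List Char) (p : Char) : List Char × List Char :=
  if p = '-' then
    if s.1 ≠ [] then (s.1.dropLast, s.2) else s
  else if p = '<' then
    if h : s.1 ≠ [] then (s.1.dropLast, s.2 ++ [s.1.getLast h]) else s
  else if p = '>' then
    if h : s.2 ≠ [] then (s.1 ++ [s.2.getLast h], s.2.dropLast) else s
  else (s.1 ++ [p], s.2)

def check (pwd : String) : String :=
  let st := pwd.toList.foldl checkStep ([], [])
  let all := st.1 ++ st.2.reverse          -- left += reversed(right)
  all.foldl (fun real r => real.push r) "" -- real = ''; for r in left: real += r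

-- ===== PORT B =====
-- one buffer with a cursor position
def checkAltStep (s : List Char × Nat) (p : Char) : List Char × Nat :=
  if p = '<' then
    if s.2 > 0 then (s.1, s.2 - 1) else s
  else if p = '>' then
    if s.2 < s.1.length then (s.1, s.2 + 1) else s
  else if p = '-' then
    if s.2 > 0 then (s.1.take (s.2 - 1) ++ s.1.drop s.2, s.2 - 1) else s
  else (s.1.take s.2 ++ p :: s.1.drop s.2, s.2 + 1)

def check_alt (pwd : String) : String :=
  let st := pwd.toList.foldl checkAltStep ([], 0)
  String.ofList st.1                            -- ''.join(buf)

-- ===== PRECONDITION & SPEC =====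
def Spec_check (pwd : String) (out : String) : Prop := out = check_alt pwd
instance (pwd : String) (out : String) : Decidable (Spec_check pwd out) := by unfold Spec_check; infer_instance

-- ===== CLAIM (what is proved, stated in full; the proofs are below) =====
def Claim_equal_check : Prop := ∀ (pwd : String), Dom_check pwd → Spec_check pwd (check pwd)

-- ===== LEMMAS AND PROOFS =====

-- relation between A's state and B's state
def PwRel (a : List Char × List Char) (b : List Char × Nat) : Prop :=
  b.1 = a.1 ++ a.2.reverse ∧ b.2 = a.1.length

theorem rel_step (a : List Char × List Char) (b : List Char × Nat) (p : Char)
    (h : PwRel a b) : PwRel (checkStep a p) (checkAltStep b p) := by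
  obtain ⟨l, r⟩ := a
  obtain ⟨bl, bc⟩ := b
  obtain ⟨hb1, hb2⟩ := h
  simp only at hb1 hb2
  subst hb1 hb2
  unfold checkStep checkAltStep
  by_cases h1 : p = '-'
  · subst h1
    by_cases hl : l = []
    · subst hl; simp [PwRel]
    · have hlen : 0 < l.length := List.length_pos_iff.mpr hl
      simp [PwRel, hl, hlen]
      rw [List.take_append_of_le_length (by omega)]
      simp [List.dropLast_eq_take]
  · by_cases h2 : p = '<'
    · subst h2
      by_cases hl : l = []
      · subst hl; simp [PwRel]
      · have hlen : 0 < l.length := List.length_pos_iff.mpr hl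
        have hdl : l.dropLast ++ [l.getLast hl] = l := List.dropLast_append_getLast hl
        simp [PwRel, hl, hlen]
        conv_lhs => rw [← hdl]
        simp
    · by_cases h3 : p = '>'
      · subst h3
        by_cases hr : r = []
        · subst hr; simp [PwRel]
        · have hlen : 0 < r.length := List.length_pos_iff.mpr hr
          have hdr : r.dropLast ++ [r.getLast hr] = r := List.dropLast_append_getLast hr
          simp [PwRel, hr, hlen]
          exact hdr.symm
      · simp [PwRel, h1, h2, h3]

theorem rel_foldl (cs : List Char) (a : List Char × List Char) (b : List Char × Nat)
    (h : PwRel a b) : PwRel (cs.foldl checkStep a) (cs.foldl checkAltStep b) := by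
  induction cs generalizing a b with
  | nil => exact h
  | cons c cs ih => exact ih _ _ (rel_step a b c h)

theorem foldl_push (cs : List Char) (s : String) :
    cs.foldl (fun real r => real.push r) s = String.ofList (s.toList ++ cs) := by
  induction cs generalizing s with
  | nil => simp
  | cons c cs ih =>
      simp only [List.foldl_cons, ih]
      congr 1
      simp

-- ===== VERDICT (by name: the statement is the Claim_ definition above) =====
theorem check_spec : Claim_equal_check := by
  intro pwd _
  unfold Spec_check check check_alt
  have h := rel_foldl pwd.toList ([], []) ([], 0) ⟨rfl, rfl⟩
  obtain ⟨h1, _⟩ := h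
  simp only
  rw [foldl_push, h1]
  simp
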